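-- pv_equiv track=rewrite | github.com/agentmorris/lila-game | game_logic.py | get_correct_answer_display
-- ===== SOURCE A (Python) =====
-- from typing import Dict, Optional, Tuple
--
-- TAXONOMIC_HIERARCHY = [
--     'variety', 'subspecies', 'species', 'subgenus', 'genus', 'tribe',
--     'subfamily', 'family', 'superfamily', 'infraorder', 'suborder',
--     'order', 'superorder', 'infraclass', 'subclass', 'class',
--     'superclass', 'subphylum', 'phylum', 'kingdom'
-- ]
--
-- def get_taxonomic_path(taxon: Dict) -> Dict[str, str]:
--     """Extract the complete taxonomic path from a taxon record."""
--     path = {}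
--
--     # Map database column names to standard names
--     column_mapping = {
--         'order_': 'order'  # Handle SQL keyword issue
--     }
--
--     for level in TAXONOMIC_HIERARCHY:
--         column = column_mapping.get(level, level)
--         value = taxon.get(column)
--         if value and str(value).strip():
--             path[level] = str(value).strip()
--
--     return path
--
-- def get_correct_answer_display(taxon: Dict) -> str:
--     """Get a formatted display string for the correct answer."""
--
--     most_specific_name = taxon.get('most_specific_name', 'Unknown')
--     common_name = taxon.get('common_name')
--
--     # Start with common name (scientific name)
--     if common_name:
--         display = f"{common_name} ({most_specific_name})"
--     else:
--         display = most_specific_name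
--
--     # Add taxonomic context on separate lines
--     path = get_taxonomic_path(taxon)
--     context_lines = []
--
--     # Add class, order, family in that order (if available)
--     for level in ['class', 'order', 'family']:
--         if level in path and path[level]:
--             context_lines.append(f"{level}: {path[level]}")
--
--     if context_lines:
--         display += "<br>" + "<br>".join(context_lines)
--
--     return display
-- ===== SOURCE B (Python) =====
-- def get_correct_answer_display(taxon):
--     """Get a formatted display string for the correct answer."""
--     most_specific_name = taxon.get('most_specific_name', 'Unknown')
--     common_name = taxon.get('common_name')
--     display = f"{common_name} ({most_specific_name})" if common_name else most_specific_name
--     context_lines = []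
--     for level in ('class', 'order', 'family'):
--         value = taxon.get(level)
--         if value and str(value).strip():
--             context_lines.append(f"{level}: {str(value).strip()}")
--     if context_lines:
--         display = display + "<br>" + "<br>".join(context_lines)
--     return display
-- ===== Notes on version B (the rewrite author's own statement) =====
-- stated objective: simpler
-- what changed: Drops the get_taxonomic_path helper and its 20-level hierarchy loop with its column-mapping dict; B reads the three displayed keys ('class','order','family') directly from the taxon in one short pass, stripping and testing each value in place.
import Mathlib
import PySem

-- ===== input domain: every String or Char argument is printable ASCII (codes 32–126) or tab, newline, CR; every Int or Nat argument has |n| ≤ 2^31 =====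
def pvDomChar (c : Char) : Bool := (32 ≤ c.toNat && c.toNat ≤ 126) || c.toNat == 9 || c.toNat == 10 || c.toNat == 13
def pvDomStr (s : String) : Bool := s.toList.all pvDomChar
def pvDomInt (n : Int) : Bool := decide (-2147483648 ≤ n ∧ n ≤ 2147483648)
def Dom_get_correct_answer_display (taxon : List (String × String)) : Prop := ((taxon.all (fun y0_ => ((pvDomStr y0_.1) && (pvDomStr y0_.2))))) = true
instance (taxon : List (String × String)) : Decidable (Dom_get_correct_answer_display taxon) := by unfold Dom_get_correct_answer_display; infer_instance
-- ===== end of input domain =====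

-- B drops the get_taxonomic_path helper and its 20-level hierarchy loop, reading the three
-- displayed keys directly from the taxon (objective: simpler).


-- ===== PORT A =====
def TAXONOMIC_HIERARCHY : List String :=
  ["variety", "subspecies", "species", "subgenus", "genus", "tribe",
   "subfamily", "family", "superfamily", "infraorder", "suborder",
   "order", "superorder", "infraclass", "subclass", "class",
   "superclass", "subphylum", "phylum", "kingdom"]

-- one iteration of get_taxonomic_path's loop body
def pathStep (taxon : PySem.Dict String String) (path : PySem.Dict String String)
    (level : String) : PySem.Dict String String :=
  let column := (PySem.Dict.ofList [("order_", "order")]).getD level level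
  match taxon.get? column with
  | some value =>
      if value ≠ "" ∧ PySem.Str.strip value ≠ "" then
        path.insert level (PySem.Str.strip value)
      else path
  | none => path

def get_taxonomic_path (taxon : List (String × String)) : PySem.Dict String String :=
  TAXONOMIC_HIERARCHY.foldl (pathStep (PySem.Dict.ofList taxon)) PySem.Dict.empty

def get_correct_answer_display (taxon : List (String × String)) : String :=
  let d := PySem.Dict.ofList taxon
  let most_specific_name := d.getD "most_specific_name" "Unknown"
  let common_name := d.get? "common_name"
  let display :=
    match common_name with
    | some cn => if cn ≠ "" then cn ++ " (" ++ most_specific_name ++ ")" else most_specific_name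
    | none => most_specific_name
  let path := get_taxonomic_path taxon
  let context_lines :=
    ["class", "order", "family"].foldl (fun acc level =>
      match path.get? level with
      | some v => if v ≠ "" then acc ++ [level ++ ": " ++ v] else acc
      | none => acc) []
  if context_lines ≠ [] then display ++ "<br>" ++ PySem.Str.join "<br>" context_lines
  else display

-- ===== PORT B =====
def get_correct_answer_display_alt (taxon : List (String × String)) : String :=
  let d := PySem.Dict.ofList taxon
  let most_specific_name := d.getD "most_specific_name" "Unknown"
  let common_name := d.get? "common_name"
  let display :=
    match common_name with
    | some cn => if cn ≠ "" then cn ++ " (" ++ most_specific_name ++ ")" else most_specific_name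
    | none => most_specific_name
  let context_lines :=
    ["class", "order", "family"].foldl (fun acc level =>
      match d.get? level with
      | some v =>
          if v ≠ "" ∧ PySem.Str.strip v ≠ "" then
            acc ++ [level ++ ": " ++ PySem.Str.strip v]
          else acc
      | none => acc) []
  if context_lines ≠ [] then display ++ "<br>" ++ PySem.Str.join "<br>" context_lines
  else display

-- ===== PRECONDITION & SPEC =====
def Spec_get_correct_answer_display (taxon : List (String × String)) (out : String) : Prop := out = get_correct_answer_display_alt taxon
instance (taxon : List (String × String)) (out : String) : Decidable (Spec_get_correct_answer_display taxon out) := by unfold Spec_get_correct_answer_display; infer_instance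

-- ===== CLAIM (what is proved, stated in full; the proofs are below) =====
def Claim_equal_get_correct_answer_display : Prop := ∀ (taxon : List (String × String)), Dom_get_correct_answer_display taxon → Spec_get_correct_answer_display taxon (get_correct_answer_display taxon)

-- ===== LEMMAS AND PROOFS =====

theorem strip_empty : PySem.Str.strip "" = "" := by decide

-- lookup after a fold of conditional inserts: the last (here: only) insert for the key wins
theorem get?_foldl_insert (cond : String → Prop) [DecidablePred cond] (val : String → String) :
    ∀ (ls : List String) (init : PySem.Dict String String) (k : String),
      (ls.foldl (fun p l => if cond l then p.insert l (val l) else p) init).get? k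
        = if k ∈ ls ∧ cond k then some (val k) else init.get? k := by
  intro ls
  induction ls with
  | nil => intro init k; simp
  | cons l ls ih =>
      intro init k
      rw [List.foldl_cons, ih]
      by_cases hmem : k ∈ ls ∧ cond k
      · simp [hmem.1, hmem.2]
      · rw [if_neg hmem]
        by_cases hcl : cond l
        · rw [if_pos hcl, PySem.Dict.get?_insert]
          by_cases hkl : k = l
          · subst hkl; simp [hcl]
          · simp only [if_neg hkl]
            have : ¬ (k ∈ l :: ls ∧ cond k) := by
              rintro ⟨hm, hc⟩
              rcases List.mem_cons.mp hm with h | h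
              · exact hkl h
              · exact hmem ⟨h, hc⟩
            rw [if_neg this]
        · rw [if_neg hcl]
          have : ¬ (k ∈ l :: ls ∧ cond k) := by
            rintro ⟨hm, hc⟩
            rcases List.mem_cons.mp hm with h | h
            · subst h; exact hcl hc
            · exact hmem ⟨h, hc⟩
          rw [if_neg this]

theorem strip_eq_empty_of_eq (v : String) (h : v = "") : PySem.Str.strip v = "" := by
  subst h; decide

-- the loop body of get_taxonomic_path in conditional-insert form
theorem pathStep_eq (d : PySem.Dict String String) :
    pathStep d = fun p l =>
      if PySem.Str.strip ((d.get? ((PySem.Dict.ofList [("order_", "order")]).getD l l)).getD "") ≠ "" then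
        p.insert l (PySem.Str.strip ((d.get? ((PySem.Dict.ofList [("order_", "order")]).getD l l)).getD ""))
      else p := by
  funext p l
  unfold pathStep
  cases h : d.get? ((PySem.Dict.ofList [("order_", "order")]).getD l l) with
  | none => simp [h, strip_empty]
  | some v =>
      simp only [h, Option.getD_some]
      by_cases hs : PySem.Str.strip v = ""
      · have hv : ¬ (v ≠ "" ∧ PySem.Str.strip v ≠ "") := by
          rintro ⟨_, h2⟩; exact h2 hs
        simp [hs]
      · have hv0 : v ≠ "" := fun he => hs (strip_eq_empty_of_eq v he)
        simp [hs, hv0]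

-- what A's path holds at a key of the hierarchy whose column name is the key itself
theorem path_get? (taxon : List (String × String)) (k : String)
    (hk : k ∈ TAXONOMIC_HIERARCHY)
    (hcol : (PySem.Dict.ofList [("order_", "order")]).getD k k = k) :
    (get_taxonomic_path taxon).get? k
      = match (PySem.Dict.ofList taxon).get? k with
        | some v =>
            if PySem.Str.strip v ≠ "" then some (PySem.Str.strip v) else none
        | none => none := by
  unfold get_taxonomic_path
  rw [pathStep_eq, get?_foldl_insert]
  rw [hcol]
  cases h : (PySem.Dict.ofList taxon).get? k with
  | none => simp [hk, strip_empty]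
  | some v =>
      by_cases hv : PySem.Str.strip v = ""
      · simp [hk, hv]
      · simp [hk, hv]

-- ===== VERDICT (by name: the statement is the Claim_ definition above) =====
theorem get_correct_answer_display_spec : Claim_equal_get_correct_answer_display := by
  intro taxon _
  unfold Spec_get_correct_answer_display get_correct_answer_display get_correct_answer_display_alt
  have hctx : ∀ acc : List String,
      ["class", "order", "family"].foldl (fun acc level =>
        match (get_taxonomic_path taxon).get? level with
        | some v => if v ≠ "" then acc ++ [level ++ ": " ++ v] else acc
        | none => acc) acc
      = ["class", "order", "family"].foldl (fun acc level =>
        match (PySem.Dict.ofList taxon).get? level with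
        | some v =>
            if v ≠ "" ∧ PySem.Str.strip v ≠ "" then
              acc ++ [level ++ ": " ++ PySem.Str.strip v]
            else acc
        | none => acc) acc := by
    intro acc
    have step : ∀ (k : String) (acc : List String), k ∈ TAXONOMIC_HIERARCHY →
        (PySem.Dict.ofList [("order_", "order")]).getD k k = k →
        (match (get_taxonomic_path taxon).get? k with
         | some v => if v ≠ "" then acc ++ [k ++ ": " ++ v] else acc
         | none => acc)
        = (match (PySem.Dict.ofList taxon).get? k with
           | some v =>
               if v ≠ "" ∧ PySem.Str.strip v ≠ "" then
                 acc ++ [k ++ ": " ++ PySem.Str.strip v]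
               else acc
           | none => acc) := by
      intro k acc hk hcol
      rw [path_get? taxon k hk hcol]
      cases h : (PySem.Dict.ofList taxon).get? k with
      | none => rfl
      | some v =>
          -- strip v ≠ "" whenever the entry was inserted, so A's inner test passes
          by_cases hs : PySem.Str.strip v = ""
          · have hv : ¬ (v ≠ "" ∧ PySem.Str.strip v ≠ "") := by
              rintro ⟨_, h2⟩; exact h2 hs
            simp [hs]
          · have hv0 : v ≠ "" := fun he => hs (strip_eq_empty_of_eq v he)
            simp [hs, hv0]
    simp only [List.foldl_cons, List.foldl_nil]
    rw [step "class" acc (by decide) (by decide)]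
    rw [step "order" _ (by decide) (by decide)]
    rw [step "family" _ (by decide) (by decide)]
  simp only []
  rw [hctx]
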